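-- pv_equiv track=rewrite | github.com/NamSellsFish/AI-Final-Project-Backup-Plan | AIFinalProject/datageneration.py | get_depths
-- ===== SOURCE A (Python) =====
-- def get_depths(start: int,
--                 step_size:int,
--                   step_count:int):
--     '''Generate depth value as a sequence.'''
--     yield start
--
--     if step_count > 0:
--         '''
--         return get_depths(start + step_size,
--                       step_size,
--                         step_count - 1)
--         '''
--         for item in get_depths(start + step_size,
--                       step_size,
--                         step_count - 1):
--             yield item
-- ===== SOURCE B (Python) =====
-- def get_depths(start: int,
--                 step_size: int,
--                   step_count: int):
--     '''Generate depth value as a sequence (iteratively).'''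
--     current = start
--     yield current
--     for _ in range(step_count):
--         current += step_size
--         yield current
-- ===== Notes on version B (the rewrite author's own statement) =====
-- stated objective: idiomatic
-- what changed: Replaced the recursive generator (which re-delegates to itself and re-yields each item) with a single iterative loop accumulating current += step_size over range(step_count).
import Mathlib
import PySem

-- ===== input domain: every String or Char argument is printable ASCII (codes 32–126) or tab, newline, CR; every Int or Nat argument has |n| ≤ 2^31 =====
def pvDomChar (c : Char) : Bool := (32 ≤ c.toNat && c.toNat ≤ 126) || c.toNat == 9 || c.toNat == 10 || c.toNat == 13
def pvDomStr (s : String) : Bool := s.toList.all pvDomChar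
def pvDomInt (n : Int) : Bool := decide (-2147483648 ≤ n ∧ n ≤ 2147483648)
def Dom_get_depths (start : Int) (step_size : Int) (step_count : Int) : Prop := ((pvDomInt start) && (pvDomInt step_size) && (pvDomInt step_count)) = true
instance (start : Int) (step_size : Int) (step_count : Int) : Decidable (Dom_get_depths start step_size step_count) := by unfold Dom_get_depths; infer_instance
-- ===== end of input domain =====

-- B replaces A's recursive generator delegation with one iterative accumulation loop (idiomatic).


-- ===== PORT A =====
-- recursive generator: yield start; if step_count > 0, re-yield the recursive call's items
def get_depths (start : Int) (step_size : Int) (step_count : Int) : List Int :=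
  start ::
    (if _h : step_count > 0 then
      get_depths (start + step_size) step_size (step_count - 1)
    else [])
termination_by step_count.toNat
decreasing_by omega

-- ===== PORT B =====
-- iterative generator: current = start, yielded; then for _ in range(step_count): current += step_size; yield current
def get_depths_alt (start : Int) (step_size : Int) (step_count : Int) : List Int :=
  ((PySem.List.pyRange 0 step_count 1).foldl
    (fun (p : Int × List Int) _ => (p.1 + step_size, p.2 ++ [p.1 + step_size]))
    (start, [start])).2

-- ===== PRECONDITION & SPEC =====
def Spec_get_depths (start : Int) (step_size : Int) (step_count : Int) (out : List Int) : Prop := out = get_depths_alt start step_size step_count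
instance (start : Int) (step_size : Int) (step_count : Int) (out : List Int) : Decidable (Spec_get_depths start step_size step_count out) := by unfold Spec_get_depths; infer_instance

-- ===== CLAIM (what is proved, stated in full; the proofs are below) =====
def Claim_equal_get_depths : Prop := ∀ (start : Int) (step_size : Int) (step_count : Int), Dom_get_depths start step_size step_count → Spec_get_depths start step_size step_count (get_depths start step_size step_count)

-- ===== LEMMAS AND PROOFS =====

-- loop invariant: folding over any list of length n extends acc with A's sequence from cur
theorem get_depths_loop (sz : Int) (l : List Int) :
    ∀ (cur : Int) (acc : List Int),
      (l.foldl (fun (p : Int × List Int) _ => (p.1 + sz, p.2 ++ [p.1 + sz])) (cur, acc ++ [cur])).2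
        = acc ++ get_depths cur sz (l.length : Int) := by
  induction l with
  | nil =>
      intro cur acc
      rw [get_depths]
      simp
  | cons a l ih =>
      intro cur acc
      have h := ih (cur + sz) (acc ++ [cur])
      simp only [List.foldl_cons, List.append_assoc] at h ⊢
      rw [h]
      simp only [List.length_cons]
      push_cast
      conv_rhs => rw [get_depths]
      rw [dif_pos (by positivity)]
      simp [add_sub_cancel_right]

theorem get_depths_toNat (s sz c : Int) :
    get_depths s sz (c.toNat : Int) = get_depths s sz c := by
  by_cases h : c > 0
  · rw [Int.toNat_of_nonneg (by omega)]
  · conv_lhs => rw [get_depths]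
    conv_rhs => rw [get_depths]
    rw [dif_neg (by omega), dif_neg (by omega)]

-- ===== VERDICT (by name: the statement is the Claim_ definition above) =====
theorem get_depths_spec : Claim_equal_get_depths := by
  intro s sz c _
  unfold Spec_get_depths get_depths_alt
  have h := get_depths_loop sz (PySem.List.pyRange 0 c 1) s []
  simp only [List.nil_append] at h
  rw [h, PySem.List.length_pyRange_one]
  rw [show c - 0 = c by ring, get_depths_toNat]
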